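-- pv_equiv track=rewrite | github.com/hydrargyrum/decoyfs | import-ls.py | parse_modeline
-- ===== SOURCE A (Python) =====
-- import stat
--
-- filetypes = {
--     "-": stat.S_IFREG,
--     "d": stat.S_IFDIR,
--     "l": stat.S_IFLNK,
--     "s": stat.S_IFSOCK,
--     "p": stat.S_IFIFO,
--     "b": stat.S_IFBLK,
--     "c": stat.S_IFCHR,
-- }
--
-- def parse_modeline(record):
--     s_type = record[0]
--     s_perms = record[1:10]
--
--     perms = 0
--     for n, sbit in enumerate(reversed(s_perms)):
--         if sbit != "-":
--             perms |= 1 << n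
--
--     type_ = filetypes[s_type]
--     # raise NotImplementedError(record)
--
--     return type_ | perms
-- ===== SOURCE B (Python) =====
-- filetypes = {
--     "-": 0o100000,  # stat.S_IFREG
--     "d": 0o040000,  # stat.S_IFDIR
--     "l": 0o120000,  # stat.S_IFLNK
--     "s": 0o140000,  # stat.S_IFSOCK
--     "p": 0o010000,  # stat.S_IFIFO
--     "b": 0o060000,  # stat.S_IFBLK
--     "c": 0o020000,  # stat.S_IFCHR
-- }
--
-- def parse_modeline(record):
--     bits = "".join("0" if c == "-" else "1" for c in record[1:10])
--     perms = int(bits, 2) if bits else 0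
--     return filetypes[record[0]] | perms
-- ===== Notes on version B (the rewrite author's own statement) =====
-- stated objective: simpler
-- what changed: Replaces the reversed-enumerate bit-by-bit shift/OR accumulation with a direct translation of the permission field into a binary digit string converted once by int(bits, 2).
import Mathlib
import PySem

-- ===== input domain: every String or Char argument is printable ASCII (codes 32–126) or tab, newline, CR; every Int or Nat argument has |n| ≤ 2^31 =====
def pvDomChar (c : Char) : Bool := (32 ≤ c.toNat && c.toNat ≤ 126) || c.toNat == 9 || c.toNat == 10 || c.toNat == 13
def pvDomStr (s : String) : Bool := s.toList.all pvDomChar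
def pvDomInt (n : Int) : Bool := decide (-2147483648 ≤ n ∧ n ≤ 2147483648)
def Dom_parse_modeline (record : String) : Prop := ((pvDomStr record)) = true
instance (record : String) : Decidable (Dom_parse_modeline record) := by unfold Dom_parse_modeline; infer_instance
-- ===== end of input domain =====

-- B replaces A's reversed-enumerate shift/OR accumulation by translating the permission
-- field into binary digits and converting once with int(bits, 2) (objective: simpler).

-- the module-level 'filetypes' dict (single-character keys; values are the stat.S_IF* constants)
def pvFiletypes : PySem.Dict Char Int :=
  PySem.Dict.ofList [('-', 32768), ('d', 16384), ('l', 40960), ('s', 49152),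
                     ('p', 4096), ('b', 24576), ('c', 8192)]

-- ===== PORT A =====
def parse_modeline (record : String) : Int :=
  match PySem.Str.pyGet? record 0 with
  | none => 0      -- record[0] raises IndexError on the empty string: outside Pre_
  | some s_type =>
    let s_perms := PySem.List.slice record.toList (some 1) (some 10)
    let perms : Int :=
      (PySem.List.enumerate s_perms.reverse 0).foldl
        (fun perms nc =>
          -- n is a nonnegative enumerate index, so '.toNat' is exact for '1 << n'
          if nc.2 ≠ '-' then PySem.Int.bor perms ((1 : Int) <<< nc.1.toNat) else perms) 0
    match pvFiletypes.get? s_type with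
    | none => 0    -- filetypes[s_type] raises KeyError: outside Pre_
    | some type_ => PySem.Int.bor type_ perms

-- ===== PORT B =====
def parse_modeline_alt (record : String) : Int :=
  let bits := (PySem.List.slice record.toList (some 1) (some 10)).map
                (fun c => if c == '-' then '0' else '1')
  -- int(bits, 2) ported as the base-2 numeral value of the digits (exact: bits consists
  -- only of '0'/'1' digit characters; the empty string is guarded by B itself)
  let perms : Int :=
    if bits.isEmpty then 0
    else ((bits.foldl (fun a c => 2 * a + (if c == '1' then 1 else 0)) 0 : Nat) : Int)
  match PySem.Str.pyGet? record 0 with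
  | none => 0      -- record[0] raises IndexError on the empty string: outside Pre_
  | some s_type =>
    match pvFiletypes.get? s_type with
    | none => 0    -- KeyError: outside Pre_
    | some type_ => PySem.Int.bor type_ perms

-- ===== PRECONDITION & SPEC =====
-- Pre_ excludes exactly the records where A raises: the empty string (IndexError on
-- record[0]) and records whose first character is not a filetypes key (KeyError).
def Pre_parse_modeline (record : String) : Prop :=
  record.toList.head? ∈ [some '-', some 'd', some 'l', some 's', some 'p', some 'b', some 'c']
instance (record : String) : Decidable (Pre_parse_modeline record) := by
  unfold Pre_parse_modeline; infer_instance
def pvWitness_parse_modeline : String := "d"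

def Spec_parse_modeline (record : String) (out : Int) : Prop := out = parse_modeline_alt record
instance (record : String) (out : Int) : Decidable (Spec_parse_modeline record out) := by
  unfold Spec_parse_modeline; infer_instance

-- ===== CLAIM (what is proved, stated in full; the proofs are below) =====
def Claim_equal_parse_modeline : Prop := ∀ (record : String), Dom_parse_modeline record → Pre_parse_modeline record → Spec_parse_modeline record (parse_modeline record)

-- ===== LEMMAS AND PROOFS =====

-- the MSB-first binary value of the permission field ('-' ↦ 0, anything else ↦ 1)
def pvHorner (cs : List Char) : Nat :=
  cs.foldl (fun a c => 2 * a + (if c = '-' then 0 else 1)) 0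

theorem pvHorner_aux (cs : List Char) : ∀ a : Nat,
    cs.foldl (fun a c => 2 * a + (if c = '-' then 0 else 1)) a
      = a * 2 ^ cs.length + pvHorner cs := by
  induction cs with
  | nil => intro a; simp [pvHorner]
  | cons c cs ih =>
    intro a
    have e : 2 * 0 + (if c = '-' then 0 else 1) = (if c = '-' then 0 else 1) := by
      split_ifs <;> rfl
    simp only [List.foldl_cons, pvHorner, List.length_cons, e]
    rw [ih (2 * a + (if c = '-' then 0 else 1)), ih (if c = '-' then 0 else 1)]
    split_ifs <;> ring

theorem pvHorner_cons (c : Char) (cs : List Char) :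
    pvHorner (c :: cs) = (if c = '-' then 0 else 1) * 2 ^ cs.length + pvHorner cs := by
  have e : 2 * 0 + (if c = '-' then 0 else 1) = (if c = '-' then 0 else 1) := by
    split_ifs <;> rfl
  simp only [pvHorner, List.foldl_cons, e]
  exact pvHorner_aux cs _

theorem pvHorner_lt (cs : List Char) : pvHorner cs < 2 ^ cs.length := by
  induction cs with
  | nil => simp [pvHorner]
  | cons c cs ih =>
    rw [pvHorner_cons]
    have hb : (if c = '-' then 0 else 1) ≤ 1 := by split_ifs <;> omega
    have hp : 2 ^ (c :: cs).length = 2 ^ cs.length + 2 ^ cs.length := by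
      simp [List.length_cons]; ring
    rw [hp]
    nlinarith [ih]

theorem pv_shift_one (n : Nat) : (1 : Int) <<< (n : Int) = ((2 ^ n : Nat) : Int) := by
  simp only [HShiftLeft.hShiftLeft, ShiftLeft.shiftLeft]
  simp [Nat.shiftLeft'_false, Nat.shiftLeft_eq]

-- A's reversed-enumerate OR-accumulation equals the MSB-first binary value
theorem pvAFold_eq (cs : List Char) :
    (PySem.List.enumerate cs.reverse 0).foldl
      (fun perms nc =>
        if nc.2 ≠ '-' then PySem.Int.bor perms ((1 : Int) <<< nc.1.toNat) else perms) 0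
    = (pvHorner cs : Int) := by
  induction cs with
  | nil => simp [pvHorner]
  | cons c cs ih =>
    rw [List.reverse_cons, PySem.List.enumerate_append, List.foldl_append, ih]
    have hl : PySem.List.enumerate [c] ((0 : Int) + cs.reverse.length)
        = [((cs.length : Int), c)] := by
      simp [PySem.List.enumerate_cons, PySem.List.enumerate_nil]
    rw [hl]
    simp only [List.foldl_cons, List.foldl_nil]
    by_cases hc : c = '-'
    · simp [hc, pvHorner_cons]
    · rw [if_pos (by simp [hc]), pvHorner_cons, if_neg hc]
      simp only [Int.toNat_natCast]
      rw [pv_shift_one, PySem.Int.bor_natCast]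
      have h2 := Nat.two_pow_add_eq_or_of_lt (pvHorner_lt cs) 1
      simp only [mul_one] at h2
      rw [Nat.lor_comm, ← h2]
      push_cast; ring

-- B's fold over the translated digit string equals the same value
theorem pvBFold_aux (cs : List Char) : ∀ a : Nat,
    (cs.map (fun c => if c == '-' then '0' else '1')).foldl
      (fun a c => 2 * a + (if c == '1' then 1 else 0)) a
    = cs.foldl (fun a c => 2 * a + (if c = '-' then 0 else 1)) a := by
  induction cs with
  | nil => intro a; rfl
  | cons c cs ih =>
    intro a
    simp only [List.map_cons, List.foldl_cons]
    rw [show (2 * a + (if (if c == '-' then '0' else '1') == '1' then 1 else 0))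
          = 2 * a + (if c = '-' then 0 else 1) by by_cases hc : c = '-' <;> simp [hc]]
    exact ih _

-- the permission value computed by A's loop equals B's int(bits, 2) value
theorem pvPerms_eq (l : List Char) :
    (PySem.List.enumerate l.reverse 0).foldl
      (fun perms nc =>
        if nc.2 ≠ '-' then PySem.Int.bor perms ((1 : Int) <<< nc.1.toNat) else perms) 0
    = (if (l.map (fun c => if c == '-' then '0' else '1')).isEmpty then (0 : Int)
       else (((l.map (fun c => if c == '-' then '0' else '1')).foldl
                (fun a c => 2 * a + (if c == '1' then 1 else 0)) 0 : Nat) : Int)) := by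
  rw [pvAFold_eq, pvBFold_aux]
  by_cases he : l = []
  · simp [he, pvHorner]
  · rw [if_neg (by simpa using he)]; rfl

theorem parse_modeline_eq (record : String) :
    parse_modeline record = parse_modeline_alt record := by
  unfold parse_modeline parse_modeline_alt
  simp only [pvPerms_eq]

-- ===== VERDICT (by name: the statement is the Claim_ definition above) =====
theorem parse_modeline_spec : Claim_equal_parse_modeline := by
  intro record _ _
  unfold Spec_parse_modeline
  exact parse_modeline_eq record
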